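-- pv_equiv track=rewrite | github.com/MrBrantCode/unitest_baseline | mut_generate/mist_train_cf/cf_98771/solution.py | uncommon_letter_frequency
-- ===== SOURCE A (Python) =====
-- def uncommon_letter_frequency(lst):
--     uncommon_letters = set()
--     freq = {}
--     for string in lst:
--         for c in set(string):
--             if sum([string.count(c) for string in lst]) == 1:
--                 uncommon_letters.add(c)
--                 if c in freq:
--                     freq[c] += ord(c) * lst.count(string)
--                 else:
--                     freq[c] = ord(c) * lst.count(string)
--
--     return sorted(lst, key=lambda x: sum([freq[c] for c in set(x) if c in uncommon_letters]) or x)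
-- ===== SOURCE B (Python) =====
-- def uncommon_letter_frequency(lst):
--     total = {}
--     for s in lst:
--         for c in s:
--             total[c] = total.get(c, 0) + 1
--
--     def weight(x):
--         return sum(ord(c) for c in set(x) if total[c] == 1)
--
--     return sorted(lst, key=lambda x: weight(x) or x)
-- ===== Notes on version B (the rewrite author's own statement) =====
-- stated objective: faster
-- what changed: A recomputes, for every distinct character of every string, the total occurrence count by scanning the whole list (and rescans the list for string counts); B builds one character-count dict in a single pass over all characters and sorts with the same key.
import Mathlib
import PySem

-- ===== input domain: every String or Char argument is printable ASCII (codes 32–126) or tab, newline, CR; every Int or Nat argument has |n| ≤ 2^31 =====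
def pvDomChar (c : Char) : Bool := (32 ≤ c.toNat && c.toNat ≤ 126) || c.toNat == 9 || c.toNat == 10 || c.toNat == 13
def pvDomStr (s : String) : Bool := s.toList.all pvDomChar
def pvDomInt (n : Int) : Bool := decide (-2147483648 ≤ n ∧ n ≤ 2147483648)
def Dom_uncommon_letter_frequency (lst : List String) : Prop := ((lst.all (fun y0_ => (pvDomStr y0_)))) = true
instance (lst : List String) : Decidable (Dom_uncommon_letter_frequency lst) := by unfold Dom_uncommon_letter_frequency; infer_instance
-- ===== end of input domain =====

-- B replaces A's quadratic per-character total-count scans by one character-count dict built in a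
-- single pass, keeping the same sort key.  NOTE on the sort key: Python's `sum(...) or x` key is an
-- int for a string with uncommon letters and the string itself otherwise; both ports encode it as the
-- lexicographic pair (w, if w = 0 then x else ""), which is exact whenever the Python keys are
-- mutually comparable — mixed int/str keys make Python's sorted raise TypeError, excluded by Pre_.

-- ===== PORT A =====
-- one step of A's outer loop 'for string in lst: for c in set(string): …'
def uflStepA (lst : List String) (st : PySem.Set Char × PySem.Dict Char Int) (string : String) :
    PySem.Set Char × PySem.Dict Char Int :=
  (PySem.Set.ofList string.toList).foldl (fun st c =>
    if (lst.map (fun string => (PySem.Str.count string (String.ofList [c]) : Int))).sum == 1 then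
      (PySem.Set.add st.1 c,
       if st.2.contains c then
         st.2.insert c (st.2.getD c 0 + (c.toNat : Int) * (lst.count string : Int))
       else
         st.2.insert c ((c.toNat : Int) * (lst.count string : Int)))
    else st) st

-- A's sort key 'sum([freq[c] for c in set(x) if c in uncommon_letters])'
-- (freq[c] ported as getD c 0: exact, since every c in uncommon_letters is a key of freq)
def uflKeyA (st : PySem.Set Char × PySem.Dict Char Int) (x : String) : Int :=
  (((PySem.Set.ofList x.toList).filter (fun c => PySem.Set.contains st.1 c)).map
    (fun c => st.2.getD c 0)).sum

def uncommon_letter_frequency (lst : List String) : List String :=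
  let st := lst.foldl (uflStepA lst) (PySem.Set.empty, PySem.Dict.empty)
  PySem.List.sorted2 lst (fun x => uflKeyA st x) (fun x => if uflKeyA st x = 0 then x else "")

-- ===== PORT B =====
-- B's single pass: total[c] = total.get(c, 0) + 1 over every character of every string
def uflTotalB (lst : List String) : PySem.Dict Char Int :=
  lst.foldl (fun d s => s.toList.foldl (fun d c => d.insert c (d.getD c 0 + 1)) d) PySem.Dict.empty

-- B's weight 'sum(ord(c) for c in set(x) if total[c] == 1)'
-- (total[c] ported as getD c 0: exact, since every character of a string of lst is a key of total)
def uflWeightB (total : PySem.Dict Char Int) (x : String) : Int :=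
  (((PySem.Set.ofList x.toList).filter (fun c => total.getD c 0 == 1)).map
    (fun c => (c.toNat : Int))).sum

def uncommon_letter_frequency_alt (lst : List String) : List String :=
  let total := uflTotalB lst
  PySem.List.sorted2 lst (fun x => uflWeightB total x)
    (fun x => if uflWeightB total x = 0 then x else "")

-- ===== PRECONDITION & SPEC =====
-- number of occurrences of character c in all strings of lst together
def pvTotCount (lst : List String) (c : Char) : Nat := (lst.flatMap (fun s => s.toList)).count c

-- Pre_ excludes exactly the inputs where Python's sorted raises TypeError: with at least two
-- strings, some having an uncommon letter (int key) and some not (str key), int and str compare.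
def Pre_uncommon_letter_frequency (lst : List String) : Prop :=
  lst.length ≤ 1 ∨ lst.all (fun s => s.toList.any (fun c => pvTotCount lst c == 1)) = true ∨
    lst.all (fun s => s.toList.all (fun c => pvTotCount lst c != 1)) = true
instance (lst : List String) : Decidable (Pre_uncommon_letter_frequency lst) := by
  unfold Pre_uncommon_letter_frequency; infer_instance

def pvWitness_uncommon_letter_frequency : List String := ["ab", "cd"]

def Spec_uncommon_letter_frequency (lst : List String) (out : List String) : Prop := out = uncommon_letter_frequency_alt lst
instance (lst : List String) (out : List String) : Decidable (Spec_uncommon_letter_frequency lst out) := by unfold Spec_uncommon_letter_frequency; infer_instance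

-- ===== CLAIM (what is proved, stated in full; the proofs are below) =====
def Claim_equal_uncommon_letter_frequency : Prop := ∀ (lst : List String), Dom_uncommon_letter_frequency lst → Pre_uncommon_letter_frequency lst → Spec_uncommon_letter_frequency lst (uncommon_letter_frequency lst)

-- ===== LEMMAS AND PROOFS =====

lemma ufl_count_go_single (c : Char) : ∀ (s : List Char) (fuel acc : Nat), s.length ≤ fuel →
    PySem.Chars.count.go [c] fuel s acc = acc + s.count c := by
  intro s
  induction s with
  | nil => intro fuel acc h; cases fuel <;> simp [PySem.Chars.count.go]
  | cons h t ih =>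
    intro fuel acc hf
    cases fuel with
    | zero => simp at hf
    | succ f =>
      have hlen : t.length ≤ f := by simpa using hf
      simp only [PySem.Chars.count.go, List.isPrefixOf, Bool.and_eq_true]
      by_cases hc : h = c
      · subst hc
        simp [ih _ _ hlen]
        omega
      · have hbe : (c == h) = false := by simp; exact fun e => hc e.symm
        simp [hbe, ih _ _ hlen, hc]

lemma ufl_count_single (s : String) (c : Char) :
    PySem.Str.count s (String.ofList [c]) = s.toList.count c := by
  have h := ufl_count_go_single c s.toList s.length 0 (le_of_eq String.length_toList)
  simp [PySem.Chars.count, h]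

lemma ufl_testA (lst : List String) (c : Char) :
    ((lst.map (fun string => (PySem.Str.count string (String.ofList [c]) : Int))).sum == (1 : Int)) =
      decide (pvTotCount lst c = 1) := by
  have hsum : (lst.map (fun string => (PySem.Str.count string (String.ofList [c]) : Int))).sum
      = (pvTotCount lst c : Int) := by
    simp only [ufl_count_single, pvTotCount]
    induction lst with
    | nil => simp
    | cons s t ih => simp [List.count_append, ih]
  rw [hsum]
  by_cases h : pvTotCount lst c = 1 <;> simp [h]

lemma ufl_tot_eq_sum (lst : List String) (c : Char) :
    pvTotCount lst c = (lst.map (fun s => s.toList.count c)).sum := by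
  unfold pvTotCount
  induction lst with
  | nil => simp
  | cons s t ih => simp [List.count_append, ih]

lemma ufl_sum_ge (l : List String) (x : String) (g : String → Nat) :
    l.count x * g x ≤ (l.map g).sum := by
  induction l with
  | nil => simp
  | cons a t ih =>
    simp only [List.count_cons, List.map_cons, List.sum_cons]
    by_cases h : x = a
    · subst h
      simp only [BEq.rfl, if_pos]
      rw [Nat.add_mul, Nat.one_mul]
      omega
    · rw [if_neg (by simp [beq_iff_eq]; exact fun e => h e.symm), Nat.add_zero]
      omega

lemma ufl_count_string_one (lst : List String) (string : String) (c : Char)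
    (hmem : string ∈ lst) (hc : c ∈ string.toList) (h1 : pvTotCount lst c = 1) :
    lst.count string = 1 := by
  have hge := ufl_sum_ge lst string (fun s => s.toList.count c)
  rw [← ufl_tot_eq_sum, h1] at hge
  have hcnt : 0 < string.toList.count c := List.count_pos_iff.mpr hc
  have hocc : 0 < lst.count string := List.count_pos_iff.mpr hmem
  have : lst.count string ≤ lst.count string * string.toList.count c :=
    Nat.le_mul_of_pos_right _ hcnt
  omega

lemma ufl_totalB_gen (lst : List String) : ∀ (d : PySem.Dict Char Int) (c : Char),
    (lst.foldl (fun d s => s.toList.foldl (fun d c => d.insert c (d.getD c 0 + 1)) d) d).getD c 0 =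
      d.getD c 0 + (pvTotCount lst c : Int) := by
  induction lst with
  | nil => intro d c; simp [pvTotCount]
  | cons s t ih =>
    intro d c
    simp only [List.foldl_cons, ih, PySem.Dict.getD_foldl_insert_add_one]
    have : pvTotCount (s :: t) c = s.toList.count c + pvTotCount t c := by
      simp [pvTotCount, List.count_append]
    rw [this]; push_cast; ring

lemma ufl_totalB (lst : List String) (c : Char) :
    (uflTotalB lst).getD c 0 = (pvTotCount lst c : Int) := by
  have h := ufl_totalB_gen lst PySem.Dict.empty c
  unfold uflTotalB
  rw [h]
  simp [PySem.Dict.getD, PySem.Dict.empty, PySem.Dict.get?]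

lemma ufl_innerA (lst : List String) (string : String) (hmem : string ∈ lst) :
    ∀ (cs : List Char) (seen : List Char) (st : PySem.Set Char × PySem.Dict Char Int),
    cs ⊆ string.toList → cs.Nodup →
    (∀ c ∈ cs, pvTotCount lst c = 1 → c ∉ seen) →
    (∀ c, c ∈ st.1 ↔ (pvTotCount lst c = 1 ∧ c ∈ seen)) →
    (∀ c, st.2.get? c = if pvTotCount lst c = 1 ∧ c ∈ seen then some ((c.toNat : Int)) else none) →
    (∀ c, c ∈ (cs.foldl (fun st c =>
        if (lst.map (fun string => (PySem.Str.count string (String.ofList [c]) : Int))).sum == 1 then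
          (PySem.Set.add st.1 c,
           if st.2.contains c then
             st.2.insert c (st.2.getD c 0 + (c.toNat : Int) * (lst.count string : Int))
           else
             st.2.insert c ((c.toNat : Int) * (lst.count string : Int)))
        else st) st).1 ↔ (pvTotCount lst c = 1 ∧ (c ∈ seen ∨ c ∈ cs))) ∧
    (∀ c, (cs.foldl (fun st c =>
        if (lst.map (fun string => (PySem.Str.count string (String.ofList [c]) : Int))).sum == 1 then
          (PySem.Set.add st.1 c,
           if st.2.contains c then
             st.2.insert c (st.2.getD c 0 + (c.toNat : Int) * (lst.count string : Int))
           else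
             st.2.insert c ((c.toNat : Int) * (lst.count string : Int)))
        else st) st).2.get? c =
      if pvTotCount lst c = 1 ∧ (c ∈ seen ∨ c ∈ cs) then some ((c.toNat : Int)) else none) := by
  intro cs
  induction cs with
  | nil =>
    intro seen st _ _ _ hset hdict
    simp only [List.foldl_nil, List.not_mem_nil, or_false]
    exact ⟨hset, hdict⟩
  | cons c0 cs' ih =>
    intro seen st hsub hnd hexcl hset hdict
    simp only [List.foldl_cons]
    have hc0s : c0 ∈ string.toList := hsub (List.mem_cons_self ..)
    by_cases hN : pvTotCount lst c0 = 1
    · have hcond : ((lst.map (fun string => (PySem.Str.count string (String.ofList [c0]) : Int))).sum == (1 : Int)) = true := by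
        rw [ufl_testA]; simpa using hN
      rw [hcond]
      simp only [if_true]
      have hc0seen : c0 ∉ seen := hexcl c0 (List.mem_cons_self ..) hN
      have hcont : st.2.contains c0 = false := by
        rw [PySem.Dict.contains_eq_isSome_get?, hdict c0, if_neg (by tauto)]
        rfl
      rw [hcont]
      simp only [Bool.false_eq_true, if_false]
      have hcnt : lst.count string = 1 := ufl_count_string_one lst string c0 hmem hc0s hN
      have hstep := ih (seen ++ [c0])
        (PySem.Set.add st.1 c0, st.2.insert c0 ((c0.toNat : Int) * ((lst.count string : Nat) : Int)))
        (fun c hc => hsub (List.mem_cons_of_mem _ hc))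
        (List.Nodup.of_cons hnd)
        (by
          intro c hc hNc
          simp only [List.mem_append, List.mem_singleton, not_or]
          exact ⟨hexcl c (List.mem_cons_of_mem _ hc) hNc,
            fun e => (List.Nodup.notMem hnd) (e ▸ hc)⟩)
        (by
          intro c
          rw [PySem.Set.mem_add]
          constructor
          · rintro (h | rfl)
            · rcases (hset c).mp h with ⟨h1, h2⟩; exact ⟨h1, by simp [h2]⟩
            · exact ⟨hN, by simp⟩
          · rintro ⟨h1, h2⟩
            simp only [List.mem_append, List.mem_singleton] at h2
            rcases h2 with h2 | rfl
            · exact Or.inl ((hset c).mpr ⟨h1, h2⟩)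
            · exact Or.inr rfl)
        (by
          intro c
          rw [PySem.Dict.get?_insert]
          by_cases hcc : c = c0
          · subst hcc
            rw [if_pos rfl, if_pos ⟨hN, by simp⟩, hcnt]
            norm_num
          · rw [if_neg hcc, hdict c]
            by_cases hsc : pvTotCount lst c = 1 ∧ c ∈ seen
            · rw [if_pos hsc, if_pos ⟨hsc.1, by simp [hsc.2]⟩]
            · rw [if_neg hsc, if_neg (by
                rintro ⟨h1, h2⟩
                simp only [List.mem_append, List.mem_singleton] at h2
                rcases h2 with h2 | rfl
                · exact hsc ⟨h1, h2⟩
                · exact hcc rfl)])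
      refine ⟨fun c => ?_, fun c => ?_⟩
      · rw [hstep.1 c]
        constructor
        · rintro ⟨h1, h2⟩
          refine ⟨h1, ?_⟩
          simp only [List.mem_append, List.mem_singleton] at h2
          rcases h2 with (h2 | rfl) | h2
          · exact Or.inl h2
          · exact Or.inr (List.mem_cons_self ..)
          · exact Or.inr (List.mem_cons_of_mem _ h2)
        · rintro ⟨h1, h2⟩
          refine ⟨h1, ?_⟩
          simp only [List.mem_append, List.mem_singleton]
          rcases h2 with h2 | h2
          · exact Or.inl (Or.inl h2)
          · rcases List.mem_cons.mp h2 with rfl | h2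
            · exact Or.inl (Or.inr rfl)
            · exact Or.inr h2
      · rw [hstep.2 c]
        by_cases hP : pvTotCount lst c = 1 ∧ (c ∈ seen ∨ c ∈ c0 :: cs')
        · rw [if_pos ?_, if_pos hP]
          refine ⟨hP.1, ?_⟩
          rcases hP.2 with h2 | h2
          · simp [h2]
          · rcases List.mem_cons.mp h2 with rfl | h2
            · simp
            · simp [h2]
        · rw [if_neg ?_, if_neg hP]
          rintro ⟨h1, h2⟩
          apply hP
          refine ⟨h1, ?_⟩
          simp only [List.mem_append, List.mem_singleton] at h2
          rcases h2 with (h2 | rfl) | h2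
          · exact Or.inl h2
          · exact Or.inr (List.mem_cons_self ..)
          · exact Or.inr (List.mem_cons_of_mem _ h2)
    · have hcond : ((lst.map (fun string => (PySem.Str.count string (String.ofList [c0]) : Int))).sum == (1 : Int)) = false := by
        rw [ufl_testA]; simpa using hN
      rw [hcond]
      simp only [Bool.false_eq_true, if_false]
      have hstep := ih (seen ++ [c0]) st
        (fun c hc => hsub (List.mem_cons_of_mem _ hc))
        (List.Nodup.of_cons hnd)
        (by
          intro c hc hNc
          simp only [List.mem_append, List.mem_singleton, not_or]
          exact ⟨hexcl c (List.mem_cons_of_mem _ hc) hNc,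
            fun e => (List.Nodup.notMem hnd) (e ▸ hc)⟩)
        (by
          intro c
          rw [hset c]
          constructor
          · rintro ⟨h1, h2⟩; exact ⟨h1, by simp [h2]⟩
          · rintro ⟨h1, h2⟩
            simp only [List.mem_append, List.mem_singleton] at h2
            rcases h2 with h2 | rfl
            · exact ⟨h1, h2⟩
            · exact absurd h1 hN)
        (by
          intro c
          rw [hdict c]
          by_cases hsc : pvTotCount lst c = 1 ∧ c ∈ seen
          · rw [if_pos hsc, if_pos ⟨hsc.1, by simp [hsc.2]⟩]
          · rw [if_neg hsc, if_neg (by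
              rintro ⟨h1, h2⟩
              simp only [List.mem_append, List.mem_singleton] at h2
              rcases h2 with h2 | rfl
              · exact hsc ⟨h1, h2⟩
              · exact hN h1)])
      refine ⟨fun c => ?_, fun c => ?_⟩
      · rw [hstep.1 c]
        constructor
        · rintro ⟨h1, h2⟩
          refine ⟨h1, ?_⟩
          simp only [List.mem_append, List.mem_singleton] at h2
          rcases h2 with (h2 | rfl) | h2
          · exact Or.inl h2
          · exact Or.inr (List.mem_cons_self ..)
          · exact Or.inr (List.mem_cons_of_mem _ h2)
        · rintro ⟨h1, h2⟩
          refine ⟨h1, ?_⟩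
          simp only [List.mem_append, List.mem_singleton]
          rcases h2 with h2 | h2
          · exact Or.inl (Or.inl h2)
          · rcases List.mem_cons.mp h2 with rfl | h2
            · exact absurd h1 hN
            · exact Or.inr h2
      · rw [hstep.2 c]
        by_cases hP : pvTotCount lst c = 1 ∧ (c ∈ seen ∨ c ∈ c0 :: cs')
        · rw [if_pos ?_, if_pos hP]
          refine ⟨hP.1, ?_⟩
          rcases hP.2 with h2 | h2
          · simp [h2]
          · rcases List.mem_cons.mp h2 with rfl | h2
            · exact absurd hP.1 hN
            · simp [h2]
        · rw [if_neg ?_, if_neg hP]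
          rintro ⟨h1, h2⟩
          apply hP
          refine ⟨h1, ?_⟩
          simp only [List.mem_append, List.mem_singleton] at h2
          rcases h2 with (h2 | rfl) | h2
          · exact Or.inl h2
          · exact Or.inr (List.mem_cons_self ..)
          · exact Or.inr (List.mem_cons_of_mem _ h2)

lemma ufl_outerA (lst : List String) :
    ∀ (suf pre : List String), lst = pre ++ suf →
    ∀ (st : PySem.Set Char × PySem.Dict Char Int),
    (∀ c, c ∈ st.1 ↔ (pvTotCount lst c = 1 ∧ c ∈ pre.flatMap (fun s => s.toList))) →
    (∀ c, st.2.get? c =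
      if pvTotCount lst c = 1 ∧ c ∈ pre.flatMap (fun s => s.toList) then some ((c.toNat : Int)) else none) →
    (∀ c, c ∈ (suf.foldl (uflStepA lst) st).1 ↔
        (pvTotCount lst c = 1 ∧ c ∈ lst.flatMap (fun s => s.toList))) ∧
    (∀ c, (suf.foldl (uflStepA lst) st).2.get? c =
      if pvTotCount lst c = 1 ∧ c ∈ lst.flatMap (fun s => s.toList) then some ((c.toNat : Int)) else none) := by
  intro suf
  induction suf with
  | nil =>
    intro pre hsplit st hset hdict
    simp only [List.foldl_nil]
    rw [List.append_nil] at hsplit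
    subst hsplit
    exact ⟨hset, hdict⟩
  | cons string suf' ih =>
    intro pre hsplit st hset hdict
    simp only [List.foldl_cons]
    have hmem : string ∈ lst := by rw [hsplit]; exact List.mem_append_right _ (List.mem_cons_self ..)
    -- a char of `string` also occurring in `pre` has total count ≥ 2
    have hdouble : ∀ c, c ∈ string.toList → c ∈ pre.flatMap (fun s => s.toList) →
        pvTotCount lst c ≠ 1 := by
      intro c hcs hcp
      have heq : pvTotCount lst c =
          (pre.flatMap (fun s => s.toList)).count c + (string.toList.count c +
            (suf'.flatMap (fun s => s.toList)).count c) := by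
        simp [pvTotCount, hsplit, List.count_append]
      have h1 : 0 < (pre.flatMap (fun s => s.toList)).count c := List.count_pos_iff.mpr hcp
      have h2 : 0 < string.toList.count c := List.count_pos_iff.mpr hcs
      omega
    have hinner := ufl_innerA lst string hmem (PySem.Set.ofList string.toList)
      (pre.flatMap (fun s => s.toList)) st
      (fun c hc => (PySem.Set.mem_ofList _ _).mp hc)
      (PySem.Set.nodup_ofList _)
      (fun c hc h1 hcp => hdouble c ((PySem.Set.mem_ofList _ _).mp hc) hcp h1)
      hset hdict
    have hseen : ∀ c, (c ∈ pre.flatMap (fun s => s.toList) ∨ c ∈ PySem.Set.ofList string.toList) ↔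
        c ∈ (pre ++ [string]).flatMap (fun s => s.toList) := by
      intro c
      simp [PySem.Set.mem_ofList, List.mem_flatMap]
    have hstep := ih (pre ++ [string]) (by simpa using hsplit)
      ((uflStepA lst st string))
      (by
        intro c
        rw [show uflStepA lst st string = (PySem.Set.ofList string.toList).foldl _ st from rfl]
        rw [hinner.1 c]
        rw [hseen c])
      (by
        intro c
        rw [show uflStepA lst st string = (PySem.Set.ofList string.toList).foldl _ st from rfl]
        rw [hinner.2 c]
        by_cases hP : pvTotCount lst c = 1 ∧ c ∈ (pre ++ [string]).flatMap (fun s => s.toList)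
        · rw [if_pos ⟨hP.1, (hseen c).mpr hP.2⟩, if_pos hP]
        · rw [if_neg (fun h => hP ⟨h.1, (hseen c).mp h.2⟩), if_neg hP])
    exact hstep

lemma ufl_stateA (lst : List String) :
    (∀ c, c ∈ (lst.foldl (uflStepA lst) (PySem.Set.empty, PySem.Dict.empty)).1 ↔ pvTotCount lst c = 1) ∧
    (∀ c, (lst.foldl (uflStepA lst) (PySem.Set.empty, PySem.Dict.empty)).2.get? c =
      if pvTotCount lst c = 1 then some ((c.toNat : Int)) else none) := by
  have hmem1 : ∀ c, pvTotCount lst c = 1 → c ∈ lst.flatMap (fun s => s.toList) := by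
    intro c h1
    unfold pvTotCount at h1
    exact List.count_pos_iff.mp (by omega)
  have h := ufl_outerA lst lst [] rfl (PySem.Set.empty, PySem.Dict.empty)
    (by intro c; simp [PySem.Set.empty])
    (by intro c; simp [PySem.Dict.empty, PySem.Dict.get?])
  refine ⟨fun c => ?_, fun c => ?_⟩
  · rw [h.1 c]
    exact ⟨fun h => h.1, fun h1 => ⟨h1, hmem1 c h1⟩⟩
  · rw [h.2 c]
    by_cases h1 : pvTotCount lst c = 1
    · rw [if_pos ⟨h1, hmem1 c h1⟩, if_pos h1]
    · rw [if_neg (fun h => h1 h.1), if_neg h1]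

lemma ufl_key_eq (lst : List String) (x : String) :
    uflKeyA (lst.foldl (uflStepA lst) (PySem.Set.empty, PySem.Dict.empty)) x =
      uflWeightB (uflTotalB lst) x := by
  obtain ⟨hset, hdict⟩ := ufl_stateA lst
  unfold uflKeyA uflWeightB
  have hfilter : (PySem.Set.ofList x.toList).filter
        (fun c => PySem.Set.contains (lst.foldl (uflStepA lst) (PySem.Set.empty, PySem.Dict.empty)).1 c)
      = (PySem.Set.ofList x.toList).filter (fun c => (uflTotalB lst).getD c 0 == 1) := by
    apply List.filter_congr
    intro c _
    rw [PySem.Set.contains_eq_decide, ufl_totalB]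
    have hb : ((pvTotCount lst c : Int) == (1 : Int)) = decide (pvTotCount lst c = 1) := by
      by_cases h1 : pvTotCount lst c = 1 <;> simp [h1]
    rw [hb]
    exact decide_eq_decide.mpr (hset c)
  rw [hfilter]
  refine congrArg List.sum ?_
  apply List.map_congr_left
  intro c hc
  have hc1 := (List.mem_filter.mp hc).2
  rw [ufl_totalB] at hc1
  have h1 : pvTotCount lst c = 1 := by simpa using hc1
  show ((lst.foldl (uflStepA lst) (PySem.Set.empty, PySem.Dict.empty)).2.get? c).getD 0 = _
  rw [hdict c, if_pos h1]
  rfl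

-- ===== VERDICT (by name: the statement is the Claim_ definition above) =====
theorem uncommon_letter_frequency_spec : Claim_equal_uncommon_letter_frequency := by
  intro lst _ _
  unfold Spec_uncommon_letter_frequency uncommon_letter_frequency uncommon_letter_frequency_alt
  have h : (fun x => uflKeyA (lst.foldl (uflStepA lst) (PySem.Set.empty, PySem.Dict.empty)) x) =
      (fun x => uflWeightB (uflTotalB lst) x) := funext (ufl_key_eq lst)
  simp only [h]
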